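-- pv_equiv track=rewrite | github.com/icebeartellsnolies/leetcode | site_code/hacker_rank former codewars/grid_challenge.py | challenge
-- ===== SOURCE A (Python) =====
-- def challenge(grid):
--     sorted_grid=[]
--     for i in grid:
--         i=list(i)
--         i.sort()
--         sorted_grid.append(i)
--     for sub_grid in range(len(sorted_grid)-1):
--         for letter in range(len(grid[sub_grid])):
--             if sorted_grid[sub_grid][letter]>sorted_grid[sub_grid+1][letter]:
--                 return 'NO'
--     return 'YES'
-- ===== SOURCE B (Python) =====
-- def challenge(grid):
--     # No sorting: sorted row p stays columnwise <= sorted row q iff there is no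
--     # character threshold c with #(chars<=c in p) < #(chars<=c in q) while that
--     # count is still an index inside p.  One streaming pass over cumulative
--     # character counts per row (128-slot prefix-count vectors).
--     prev_cum, prev_len = None, 0
--     for row in grid:
--         cnt = {}
--         for ch in row:
--             cnt[ch] = cnt.get(ch, 0) + 1
--         cum, total = [], 0
--         for c in range(128):
--             total += cnt.get(chr(c), 0)
--             cum.append(total)
--         if prev_cum is not None and any(
--                 p < q and p < prev_len for p, q in zip(prev_cum, cum)):
--             return 'NO'
--         prev_cum, prev_len = cum, len(row)
--     return 'YES'
-- ===== Notes on version B (the rewrite author's own statement) =====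
-- stated objective: alternative
-- what changed: Eliminates sorting entirely: instead of sorting each row and comparing adjacent sorted rows position by position, B builds a 128-slot cumulative character-count vector per row and decides each adjacent pair by a prefix-count dominance test (prev_cum[c] < cum[c] while prev_cum[c] < len(prev)), streaming over the rows; asymptotically O(n*(m+128)) vs O(n*m log m), but the 128-slot constant makes it no faster on grids of short rows.
import Mathlib
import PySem

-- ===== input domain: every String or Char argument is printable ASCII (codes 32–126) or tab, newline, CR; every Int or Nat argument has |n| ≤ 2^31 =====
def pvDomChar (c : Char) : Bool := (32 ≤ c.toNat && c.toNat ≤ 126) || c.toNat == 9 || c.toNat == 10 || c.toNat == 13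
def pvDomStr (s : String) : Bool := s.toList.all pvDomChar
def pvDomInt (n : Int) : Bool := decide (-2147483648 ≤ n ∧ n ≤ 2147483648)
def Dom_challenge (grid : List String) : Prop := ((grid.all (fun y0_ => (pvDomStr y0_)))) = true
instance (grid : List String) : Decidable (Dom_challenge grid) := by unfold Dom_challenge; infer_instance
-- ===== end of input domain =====

-- B removes sorting altogether: one cumulative character-count vector per row and a
-- streaming prefix-count dominance test between adjacent rows (objective: alternative).

-- ===== PORT A =====
def challenge (grid : List String) : String :=
  let sorted_grid := grid.map (fun i => PySem.List.sorted i.toList (fun c => c) false)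
  if (PySem.List.pyRange 0 ((sorted_grid.length : Int) - 1) 1).any (fun sub_grid =>
      (PySem.List.pyRange 0 ((PySem.List.pyGetD grid sub_grid "").toList.length : Int) 1).any
        (fun letter => decide
          (PySem.List.pyGetD (PySem.List.pyGetD sorted_grid (sub_grid + 1) []) letter (Char.ofNat 0)
            < PySem.List.pyGetD (PySem.List.pyGetD sorted_grid sub_grid []) letter (Char.ofNat 0))))
  then "NO" else "YES"

-- ===== PORT B =====
-- Source B's cnt loop: count the characters of one row into a dict
def rowCnt (row : String) : PySem.Dict Char Int :=
  row.toList.foldl (fun d ch => d.insert ch (d.getD ch 0 + 1)) PySem.Dict.empty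

-- Source B's cum/total loop over the 128 ASCII codes (cum list, running total)
def cumOf (row : String) : List Int × Int :=
  (PySem.List.pyRange 0 128 1).foldl
    (fun st c =>
      let total := st.2 + (rowCnt row).getD (Char.ofNat c.toNat) 0
      (st.1 ++ [total], total)) ([], 0)

-- any(p < q and p < prev_len for p, q in zip(prev_cum, cum))
def bFire (pc : List Int) (pl : Int) (cum : List Int) : Bool :=
  (pc.zip cum).any (fun pq => decide (pq.1 < pq.2 ∧ pq.1 < pl))

def bLoop : Option (List Int × Int) → List String → String
  | _, [] => "YES"
  | prev, row :: rest =>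
    let cum := (cumOf row).1
    match prev with
    | some (pc, pl) =>
      if bFire pc pl cum then "NO" else bLoop (some (cum, (row.toList.length : Int))) rest
    | none => bLoop (some (cum, (row.toList.length : Int))) rest

def challenge_alt (grid : List String) : String := bLoop none grid

-- ===== PRECONDITION & SPEC =====
-- Pre_ is exactly the set of inputs on which Python A returns normally (elsewhere A
-- raises IndexError): either no row is longer than the next row, or some adjacent pair
-- lying before the first length drop has a violating column inside both sorted rows, so
-- A answers 'NO' before an index past the end of a shorter next row could raise.
-- helper for Pre_: some adjacent pair (k, k+1) with no earlier length drop has a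
-- violating column j inside both sorted rows
def preEarlyNo (grid : List String) : Bool :=
  (List.range (grid.length - 1)).any (fun k =>
    ((List.range k).all (fun m =>
        decide ((grid.getD m "").toList.length ≤ (grid.getD (m + 1) "").toList.length)))
    &&
    (List.range (min (grid.getD k "").toList.length (grid.getD (k + 1) "").toList.length)).any
      (fun j => decide
        ((PySem.List.sorted (grid.getD (k + 1) "").toList (fun c => c) false).getD j (Char.ofNat 0)
          < (PySem.List.sorted (grid.getD k "").toList (fun c => c) false).getD j (Char.ofNat 0))))
def Pre_challenge (grid : List String) : Prop :=
  ((grid.zip grid.tail).all (fun p => decide (p.1.toList.length ≤ p.2.toList.length))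
    || preEarlyNo grid) = true
instance (grid : List String) : Decidable (Pre_challenge grid) := by unfold Pre_challenge; infer_instance
def pvWitness_challenge : List String := ["ba", "cab"]

def Spec_challenge (grid : List String) (out : String) : Prop := out = challenge_alt grid
instance (grid : List String) (out : String) : Decidable (Spec_challenge grid out) := by unfold Spec_challenge; infer_instance

-- ===== CLAIM (what is proved, stated in full; the proofs are below) =====
def Claim_equal_challenge : Prop := ∀ (grid : List String), Dom_challenge grid → Pre_challenge grid → Spec_challenge grid (challenge grid)

-- ===== LEMMAS AND PROOFS =====

-- #(chars of l whose code is ≤ c)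
def cntLe (l : List Char) (c : Nat) : Nat := l.countP (fun x => decide (x.toNat ≤ c))

-- B's per-pair condition expressed on the underlying rows (prefix-count dominance)
def countCond (P Q : List Char) : Bool :=
  (List.range 128).any (fun c => decide (cntLe P c < cntLe Q c ∧ cntLe P c < P.length))

-- the canonical "some column violates inside both sorted rows" test
def violAt (P Q : List Char) : Bool :=
  (List.range (min P.length Q.length)).any (fun j => decide
    ((PySem.List.sorted Q (fun c => c) false).getD j (Char.ofNat 0)
      < (PySem.List.sorted P (fun c => c) false).getD j (Char.ofNat 0)))

-- A's per-pair scan (over sorted rows, j ranging over the first row's length)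
def aViol (p q : List Char) : Bool :=
  (List.range p.length).any (fun j => decide (q.getD j (Char.ofNat 0) < p.getD j (Char.ofNat 0)))

def AViol (p q : String) : Bool :=
  aViol (PySem.List.sorted p.toList (fun c => c) false) (PySem.List.sorted q.toList (fun c => c) false)

def FireRow (p q : String) : Bool := bFire (cumOf p).1 ((p.toList.length : Int)) (cumOf q).1

def AnyAdjS (v : String → String → Bool) : List String → Bool
  | p :: q :: rest => v p q || AnyAdjS v (q :: rest)
  | _ => false

def RowOk (s : String) : Prop := ∀ x ∈ s.toList, x.toNat < 128

theorem charOfNat_toNat {n : Nat} (h : n < 128) : (Char.ofNat n).toNat = n := by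
  have hv : n.isValidChar := Or.inl (by omega)
  rw [Char.toNat_ofNat]; simp [hv]

theorem charLt_iff (a b : Char) : a < b ↔ a.toNat < b.toNat := by
  rw [Char.lt_def, UInt32.lt_iff_toNat_lt]; rfl

theorem charLe_toNat_iff (a b : Char) : a ≤ b ↔ a.toNat ≤ b.toNat := by
  rw [Char.le_def, UInt32.le_iff_toNat_le]; rfl

theorem sum_range_ite (n m : Nat) (F : Nat → Nat) :
    ((List.range n).map (fun k => if k = m then F k else 0)).sum = if m < n then F m else 0 := by
  induction n with
  | zero => simp
  | succ n ih =>
    rw [List.range_succ, List.map_append, List.sum_append, ih]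
    by_cases hm : m < n
    · have : n ≠ m := by omega
      simp [hm, this, Nat.lt_succ_of_lt hm]
    · by_cases he : n = m
      · subst he; simp
      · have : ¬ m < n + 1 := by omega
        simp [hm, he, this]

-- the cum/total loop computes, at slot c, the sum of the counts of codes 0..c
theorem cum_foldl (f : Nat → Int) (n : Nat) :
    (List.range n).foldl
        (fun (st : List Int × Int) k => (st.1 ++ [st.2 + f k], st.2 + f k)) ([], (0 : Int))
      = ((List.range n).map (fun c => ((List.range (c + 1)).map f).sum),
          ((List.range n).map f).sum) := by
  induction n with
  | zero => simp
  | succ n ih => rw [List.range_succ, List.foldl_append, ih]; simp [List.range_succ]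

-- sum of the counts of codes 0..c = number of chars with code ≤ c (chars all < 128)
theorem sum_count_eq_cntLe (l : List Char) (hl : ∀ x ∈ l, x.toNat < 128) (c : Nat)
    (hc : c < 128) :
    ((List.range (c + 1)).map (fun k => l.count (Char.ofNat k))).sum = cntLe l c := by
  induction l with
  | nil => simp [cntLe]
  | cons x l ih =>
    have hx : x.toNat < 128 := hl x (by simp)
    have hl' : ∀ y ∈ l, y.toNat < 128 := fun y hy => hl y (by simp [hy])
    have hmap : (List.range (c + 1)).map (fun k => (x :: l).count (Char.ofNat k))
        = (List.range (c + 1)).map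
            (fun k => l.count (Char.ofNat k) + if k = x.toNat then 1 else 0) := by
      apply List.map_congr_left
      intro k hk
      rw [List.mem_range] at hk
      rw [List.count_cons]
      congr 1
      by_cases he : k = x.toNat
      · subst he; simp [Char.ofNat_toNat]
      · have hne : ¬ (x == Char.ofNat k) = true := by
          simp only [beq_iff_eq]
          intro hxe
          apply he
          rw [hxe, charOfNat_toNat (by omega)]
        simp [hne, he]
    rw [hmap, List.sum_map_add, ih hl', sum_range_ite]
    unfold cntLe
    rw [List.countP_cons]
    by_cases hle : x.toNat ≤ c <;> simp [hle]

theorem sum_count_int (l : List Char) (hl : ∀ x ∈ l, x.toNat < 128) (c : Nat) (hc : c < 128) :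
    ((List.range (c + 1)).map (fun k => (l.count (Char.ofNat k) : Int))).sum
      = (cntLe l c : Int) := by
  rw [← sum_count_eq_cntLe l hl c hc, Nat.cast_list_sum, List.map_map]
  rfl

theorem rowCnt_getD (row : String) (v : Char) :
    (rowCnt row).getD v 0 = (row.toList.count v : Int) := by
  unfold rowCnt
  rw [PySem.Dict.getD_foldl_insert_add_one]
  simp

-- the B port's cum list is the list of cntLe values over the 128 codes
theorem cumOf_fst (row : String) (h : RowOk row) :
    (cumOf row).1 = (List.range 128).map (fun c => (cntLe row.toList c : Int)) := by
  unfold cumOf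
  rw [PySem.List.pyRange_one, List.foldl_map]
  have h128 : ((128 : Int) - 0).toNat = 128 := by decide
  rw [h128]
  have hfun : (fun (st : List Int × Int) (k : Nat) =>
        let total := st.2 + (rowCnt row).getD (Char.ofNat ((0 : Int) + (k : Int)).toNat) 0
        (st.1 ++ [total], total))
      = (fun (st : List Int × Int) (k : Nat) =>
          (st.1 ++ [st.2 + (row.toList.count (Char.ofNat k) : Int)],
            st.2 + (row.toList.count (Char.ofNat k) : Int))) := by
    funext st k
    simp [rowCnt_getD]
  rw [hfun, cum_foldl]
  apply List.map_congr_left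
  intro c hc
  rw [List.mem_range] at hc
  exact sum_count_int row.toList h c hc

-- prefix property of the sorted list: entry j is ≤ c exactly when j < cntLe
theorem sorted_getD_le_iff (l : List Char) (j c : Nat) (hj : j < l.length) :
    (((PySem.List.sorted l (fun x => x) false).getD j (Char.ofNat 0)).toNat ≤ c)
      ↔ j < cntLe l c := by
  have hlen : (PySem.List.sorted l (fun x => x) false).length = l.length :=
    PySem.List.length_sorted l (fun x => x) false
  have hjs : j < (PySem.List.sorted l (fun x => x) false).length := by omega
  have hperm : (PySem.List.sorted l (fun x => x) false).Perm l :=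
    PySem.List.sorted_perm l (fun x => x) false
  have hcnt : cntLe l c
      = (PySem.List.sorted l (fun x => x) false).countP (fun x => decide (x.toNat ≤ c)) :=
    (hperm.countP_eq _).symm
  rw [List.getD_eq_getElem _ _ hjs, hcnt]
  constructor
  · intro hle
    have htake : ((PySem.List.sorted l (fun x => x) false).take (j + 1)).countP
        (fun x => decide (x.toNat ≤ c)) = j + 1 := by
      rw [List.countP_eq_length.mpr, List.length_take]
      · omega
      · intro a ha
        rw [List.mem_iff_getElem] at ha
        obtain ⟨i, hilt, ha⟩ := ha
        have hij : i ≤ j := by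
          rw [List.length_take] at hilt; omega
        have hmono : (PySem.List.sorted l (fun x => x) false)[i]'(by omega)
            ≤ (PySem.List.sorted l (fun x => x) false)[j]'hjs :=
          PySem.List.sorted_id_getElem_mono l hij hjs
        rw [← ha, List.getElem_take]
        rw [charLe_toNat_iff] at hmono
        simp only [decide_eq_true_eq]
        omega
    have hsplit : (PySem.List.sorted l (fun x => x) false).countP (fun x => decide (x.toNat ≤ c))
        = ((PySem.List.sorted l (fun x => x) false).take (j + 1)).countP
            (fun x => decide (x.toNat ≤ c))
          + ((PySem.List.sorted l (fun x => x) false).drop (j + 1)).countP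
            (fun x => decide (x.toNat ≤ c)) := by
      conv_lhs => rw [← List.take_append_drop (j + 1) (PySem.List.sorted l (fun x => x) false)]
      rw [List.countP_append]
    omega
  · intro hlt
    by_contra hc'
    have hdrop : ((PySem.List.sorted l (fun x => x) false).drop j).countP
        (fun x => decide (x.toNat ≤ c)) = 0 := by
      rw [List.countP_eq_zero]
      intro a ha
      rw [List.mem_iff_getElem] at ha
      obtain ⟨i, hilt, ha⟩ := ha
      have hlt2 : j + i < (PySem.List.sorted l (fun x => x) false).length := by
        rw [List.length_drop] at hilt; omega
      have hmono : (PySem.List.sorted l (fun x => x) false)[j]'hjs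
          ≤ (PySem.List.sorted l (fun x => x) false)[j + i]'hlt2 :=
        PySem.List.sorted_id_getElem_mono l (by omega) hlt2
      rw [← ha, List.getElem_drop]
      rw [charLe_toNat_iff] at hmono
      simp only [decide_eq_true_eq]
      omega
    have hsplit : (PySem.List.sorted l (fun x => x) false).countP (fun x => decide (x.toNat ≤ c))
        = ((PySem.List.sorted l (fun x => x) false).take j).countP
            (fun x => decide (x.toNat ≤ c)) + 0 := by
      conv_lhs => rw [← List.take_append_drop j (PySem.List.sorted l (fun x => x) false)]
      rw [List.countP_append, hdrop]
    have hlen2 : ((PySem.List.sorted l (fun x => x) false).take j).countP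
        (fun x => decide (x.toNat ≤ c)) ≤ j := by
      calc ((PySem.List.sorted l (fun x => x) false).take j).countP _
          ≤ ((PySem.List.sorted l (fun x => x) false).take j).length := List.countP_le_length
        _ ≤ j := by rw [List.length_take]; omega
    omega

theorem countCond_iff (P Q : List Char)
    (_hP : ∀ x ∈ P, x.toNat < 128) (hQ : ∀ x ∈ Q, x.toNat < 128) :
    countCond P Q = violAt P Q := by
  have hiff : (countCond P Q = true) ↔ (violAt P Q = true) := by
    unfold countCond violAt
    rw [List.any_eq_true, List.any_eq_true]
    constructor
    · rintro ⟨c, hc, hcond⟩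
      rw [List.mem_range] at hc
      rw [decide_eq_true_eq] at hcond
      obtain ⟨h1, h2⟩ := hcond
      have hQlen : cntLe Q c ≤ Q.length := List.countP_le_length
      refine ⟨cntLe P c, by rw [List.mem_range]; omega, ?_⟩
      rw [decide_eq_true_eq]
      have hq : ((PySem.List.sorted Q (fun x => x) false).getD (cntLe P c) (Char.ofNat 0)).toNat ≤ c :=
        (sorted_getD_le_iff Q _ c (by omega)).mpr h1
      have hp : ¬ ((PySem.List.sorted P (fun x => x) false).getD (cntLe P c) (Char.ofNat 0)).toNat ≤ c := by
        intro hcon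
        have := (sorted_getD_le_iff P _ c h2).mp hcon
        omega
      rw [charLt_iff]; omega
    · rintro ⟨j, hj, hv⟩
      rw [List.mem_range] at hj
      rw [decide_eq_true_eq, charLt_iff] at hv
      have hjP : j < P.length := by omega
      have hjQ : j < Q.length := by omega
      have hjQ' : j < (PySem.List.sorted Q (fun x => x) false).length := by
        rw [PySem.List.length_sorted]; omega
      have hc128 : ((PySem.List.sorted Q (fun x => x) false).getD j (Char.ofNat 0)).toNat < 128 := by
        rw [List.getD_eq_getElem _ _ hjQ']
        refine hQ _ ?_
        exact ((PySem.List.sorted_perm Q (fun x => x) false).mem_iff).mp (List.getElem_mem _)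
      have hQc : j < cntLe Q ((PySem.List.sorted Q (fun x => x) false).getD j (Char.ofNat 0)).toNat :=
        (sorted_getD_le_iff Q j _ hjQ).mp le_rfl
      have hPc : cntLe P ((PySem.List.sorted Q (fun x => x) false).getD j (Char.ofNat 0)).toNat ≤ j := by
        have hnot : ¬ (j < cntLe P ((PySem.List.sorted Q (fun x => x) false).getD j (Char.ofNat 0)).toNat) := by
          intro hcon
          have := (sorted_getD_le_iff P j _ hjP).mpr hcon
          omega
        omega
      exact ⟨_, by rw [List.mem_range]; omega, by rw [decide_eq_true_eq]; omega⟩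
  cases h1 : countCond P Q <;> cases h2 : violAt P Q <;> simp_all

theorem aViol_sorted_eq (P Q : List Char) (hlen : P.length ≤ Q.length) :
    aViol (PySem.List.sorted P (fun c => c) false) (PySem.List.sorted Q (fun c => c) false)
      = violAt P Q := by
  unfold aViol violAt
  rw [PySem.List.length_sorted, Nat.min_eq_left hlen]

theorem violAt_imp_aViol (P Q : List Char) (h : violAt P Q = true) :
    aViol (PySem.List.sorted P (fun c => c) false) (PySem.List.sorted Q (fun c => c) false)
      = true := by
  unfold violAt at h
  unfold aViol
  rw [List.any_eq_true] at h ⊢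
  obtain ⟨j, hj, hv⟩ := h
  rw [List.mem_range] at hj
  exact ⟨j, by rw [List.mem_range, PySem.List.length_sorted]; omega, hv⟩

theorem FireRow_eq_countCond (p q : String) (hp : RowOk p) (hq : RowOk q) :
    FireRow p q = countCond p.toList q.toList := by
  unfold FireRow bFire countCond
  rw [cumOf_fst p hp, cumOf_fst q hq, List.zip_map', List.any_map]
  apply PySem.List.any_congr_mem
  intro c hc
  simp

theorem AViol_eq_FireRow (p q : String) (hp : RowOk p) (hq : RowOk q)
    (hlen : p.toList.length ≤ q.toList.length) :
    AViol p q = FireRow p q := by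
  unfold AViol
  rw [aViol_sorted_eq _ _ hlen, ← countCond_iff _ _ hp hq, FireRow_eq_countCond p q hp hq]

-- B's streaming loop, characterised by the adjacent-pair scan
theorem bLoop_some (rows : List String) (p : String) :
    bLoop (some ((cumOf p).1, (p.toList.length : Int))) rows
      = if AnyAdjS FireRow (p :: rows) then "NO" else "YES" := by
  induction rows generalizing p with
  | nil => simp [bLoop, AnyAdjS]
  | cons r rest ih =>
    show (if FireRow p r then "NO"
          else bLoop (some ((cumOf r).1, (r.toList.length : Int))) rest) = _
    by_cases hv : FireRow p r
    · simp [AnyAdjS, hv]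
    · simp only [hv]
      show _ = (if (FireRow p r || AnyAdjS FireRow (r :: rest)) then "NO" else "YES")
      simp only [hv, Bool.false_or]
      exact ih r

theorem alt_eq (grid : List String) :
    challenge_alt grid = if AnyAdjS FireRow grid then "NO" else "YES" := by
  match grid with
  | [] => simp [challenge_alt, bLoop, AnyAdjS]
  | r :: rest =>
    show bLoop (some ((cumOf r).1, (r.toList.length : Int))) rest = _
    rw [bLoop_some]

theorem range_any_adjS (v : String → String → Bool) (l : List String) :
    (List.range (l.length - 1)).any (fun i => v (l.getD i "") (l.getD (i + 1) "")) = AnyAdjS v l := by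
  induction l with
  | nil => simp [AnyAdjS]
  | cons p rest ih =>
    match rest with
    | [] => simp [AnyAdjS]
    | q :: rest' =>
      have hlen : (p :: q :: rest').length - 1 = ((q :: rest').length - 1) + 1 := by simp
      rw [hlen, List.range_succ_eq_map, List.any_cons, List.any_map]
      show _ = AnyAdjS v (p :: q :: rest')
      unfold AnyAdjS
      congr 1

theorem a_eq (grid : List String) :
    challenge grid
      = if (List.range (grid.length - 1)).any
            (fun k => AViol (grid.getD k "") (grid.getD (k + 1) "")) then "NO"
        else "YES" := by
  set rows := grid.map (fun s => PySem.List.sorted s.toList (fun c => c) false) with hrows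
  have hlen : rows.length = grid.length := by simp [hrows]
  have hcond : ((PySem.List.pyRange 0 ((rows.length : Int) - 1)).any fun sub_grid =>
      (PySem.List.pyRange 0 ((PySem.List.pyGetD grid sub_grid "").toList.length : Int)).any
        fun letter => decide
          (PySem.List.pyGetD (PySem.List.pyGetD rows (sub_grid + 1) []) letter (Char.ofNat 0)
            < PySem.List.pyGetD (PySem.List.pyGetD rows sub_grid []) letter (Char.ofNat 0)))
      = (List.range (grid.length - 1)).any
          (fun k => AViol (grid.getD k "") (grid.getD (k + 1) "")) := by
    rw [PySem.List.pyRange_one, List.any_map]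
    have htn : (((rows.length : Int) - 1) - 0).toNat = grid.length - 1 := by omega
    rw [htn]
    apply PySem.List.any_congr_mem
    intro i hi
    rw [List.mem_range] at hi
    have higrid : i < grid.length := by omega
    have hg : PySem.List.pyGetD grid ((0 : Int) + (i : Int)) "" = grid[i] := by
      simp [List.getD_eq_getElem?_getD, higrid]
    simp only [Function.comp_apply]
    rw [hg]
    have h1 : PySem.List.pyGetD rows ((0 : Int) + (i : Int)) [] = rows.getD i [] := by
      simp [List.getD_eq_getElem?_getD]
    have h2 : PySem.List.pyGetD rows ((0 : Int) + (i : Int) + 1) [] = rows.getD (i + 1) [] := by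
      have hcast : (0 : Int) + (i : Int) + 1 = ((i + 1 : Nat) : Int) := by push_cast; ring
      rw [hcast, PySem.List.pyGetD_natCast]
    rw [h1, h2]
    have hgd : grid.getD i "" = grid[i] := by
      simp [List.getD_eq_getElem?_getD, higrid]
    have hri : rows.getD i [] = PySem.List.sorted (grid.getD i "").toList (fun c => c) false := by
      simp [hrows, List.getD_eq_getElem?_getD, higrid]
    have hri1 : rows.getD (i + 1) []
        = PySem.List.sorted (grid.getD (i + 1) "").toList (fun c => c) false := by
      have h3 : i + 1 < grid.length := by omega
      simp [hrows, List.getD_eq_getElem?_getD, h3]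
    rw [hri, hri1]
    unfold AViol aViol
    rw [PySem.List.pyRange_one, List.any_map]
    have hlen2 : (((grid[i].toList.length : Int)) - 0).toNat
        = (PySem.List.sorted (grid.getD i "").toList (fun c => c) false).length := by
      rw [PySem.List.length_sorted, hgd]; omega
    rw [hlen2]
    apply PySem.List.any_congr_mem
    intro j hj
    simp only [Function.comp_apply]
    simp
  show (if ((PySem.List.pyRange 0 ((rows.length : Int) - 1)).any fun sub_grid =>
      (PySem.List.pyRange 0 ((PySem.List.pyGetD grid sub_grid "").toList.length : Int)).any
        fun letter => decide
          (PySem.List.pyGetD (PySem.List.pyGetD rows (sub_grid + 1) []) letter (Char.ofNat 0)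
            < PySem.List.pyGetD (PySem.List.pyGetD rows sub_grid []) letter (Char.ofNat 0))) = true
    then "NO" else "YES") = _
  rw [hcond]

theorem anyAdj_eq_of_mono (l : List String) (hok : ∀ s ∈ l, RowOk s)
    (hall : (l.zip l.tail).all (fun pr => decide (pr.1.toList.length ≤ pr.2.toList.length)) = true) :
    AnyAdjS AViol l = AnyAdjS FireRow l := by
  induction l with
  | nil => simp [AnyAdjS]
  | cons p rest ih =>
    cases rest with
    | nil => simp [AnyAdjS]
    | cons q rest' =>
      rw [List.all_eq_true] at hall
      have hpq : p.toList.length ≤ q.toList.length := by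
        have := hall (p, q) (by simp)
        simpa using this
      have hall' : ((q :: rest').zip (q :: rest').tail).all
          (fun pr => decide (pr.1.toList.length ≤ pr.2.toList.length)) = true := by
        rw [List.all_eq_true]
        intro pr hpr
        refine hall pr ?_
        have hpr' : pr ∈ (q :: rest').zip rest' := hpr
        simp only [List.tail_cons, List.zip_cons_cons, List.mem_cons]
        exact Or.inr hpr'
      have hok' : ∀ s ∈ q :: rest', RowOk s := fun s hs => hok s (by simp [hs])
      have hA : AnyAdjS AViol (p :: q :: rest') = (AViol p q || AnyAdjS AViol (q :: rest')) := by
        simp [AnyAdjS]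
      have hF : AnyAdjS FireRow (p :: q :: rest')
          = (FireRow p q || AnyAdjS FireRow (q :: rest')) := by
        simp [AnyAdjS]
      rw [hA, hF, AViol_eq_FireRow p q (hok p (by simp)) (hok q (by simp)) hpq, ih hok' hall']

theorem anyAdjS_true_of_witness (v : String → String → Bool) (l : List String) (k : Nat)
    (hk : k < l.length - 1) (hv : v (l.getD k "") (l.getD (k + 1) "") = true) :
    AnyAdjS v l = true := by
  rw [← range_any_adjS, List.any_eq_true]
  exact ⟨k, by rw [List.mem_range]; omega, hv⟩

theorem early_spec (grid : List String) (h : preEarlyNo grid = true) :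
    ∃ k, k < grid.length - 1
      ∧ violAt (grid.getD k "").toList (grid.getD (k + 1) "").toList = true := by
  unfold preEarlyNo at h
  rw [List.any_eq_true] at h
  obtain ⟨k, hk, hcond⟩ := h
  rw [List.mem_range] at hk
  rw [Bool.and_eq_true] at hcond
  exact ⟨k, hk, by unfold violAt; exact hcond.2⟩

-- ===== VERDICT (by name: the statement is the Claim_ definition above) =====
theorem challenge_spec : Claim_equal_challenge := by
  intro grid hdom hpre
  unfold Spec_challenge
  rw [a_eq, alt_eq, range_any_adjS]
  have hok : ∀ s ∈ grid, RowOk s := by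
    intro s hs x hx
    unfold Dom_challenge at hdom
    rw [List.all_eq_true] at hdom
    have h1 := hdom s hs
    unfold pvDomStr at h1
    rw [List.all_eq_true] at h1
    have h2 := h1 x hx
    unfold pvDomChar at h2
    simp only [Bool.or_eq_true, Bool.and_eq_true, decide_eq_true_eq, beq_iff_eq] at h2
    omega
  suffices h : AnyAdjS AViol grid = AnyAdjS FireRow grid by rw [h]
  unfold Pre_challenge at hpre
  rw [Bool.or_eq_true] at hpre
  cases hpre with
  | inl hmono => exact anyAdj_eq_of_mono grid hok hmono
  | inr hearly =>
    obtain ⟨k, hk, hviol⟩ := early_spec grid hearly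
    have hkl : k < grid.length := by omega
    have hkl1 : k + 1 < grid.length := by omega
    have hok1 : RowOk (grid.getD k "") := by
      rw [List.getD_eq_getElem _ _ hkl]
      exact hok _ (List.getElem_mem _)
    have hok2 : RowOk (grid.getD (k + 1) "") := by
      rw [List.getD_eq_getElem _ _ hkl1]
      exact hok _ (List.getElem_mem _)
    have hA : AViol (grid.getD k "") (grid.getD (k + 1) "") = true := by
      unfold AViol
      exact violAt_imp_aViol _ _ hviol
    have hB : FireRow (grid.getD k "") (grid.getD (k + 1) "") = true := by
      rw [FireRow_eq_countCond _ _ hok1 hok2, countCond_iff _ _ hok1 hok2]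
      exact hviol
    rw [anyAdjS_true_of_witness AViol grid k hk hA,
      anyAdjS_true_of_witness FireRow grid k hk hB]
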